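-- pv_equiv track=rewrite | github.com/Violatsai/MITCS0001 | Assignment03/ps3.py | calculate_handlen
-- ===== SOURCE A (Python) =====
-- def calculate_handlen(hand):
--     """
--     Returns the length (number of letters) in the current hand.
--
--     hand: dictionary (string-> int)
--     returns: integer
--     """
--     length_of_hand = 0
--     for letter in hand.keys():
--     	if letter != "*":
--     		length_of_hand += hand[letter]
--     	else:
--     		pass
--     return int(length_of_hand)
-- ===== SOURCE B (Python) =====
-- def calculate_handlen(hand):
--     """
--     Returns the length (number of letters) in the current hand.
--
--     hand: dictionary (string-> int)
--     returns: integer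
--     """
--     items = list(hand.items())
--
--     def go(lo, hi):
--         # divide-and-conquer sum of the non-wildcard counts in items[lo:hi]
--         if hi - lo <= 0:
--             return 0
--         if hi - lo == 1:
--             letter, count = items[lo]
--             return 0 if letter == "*" else count
--         mid = (lo + hi) // 2
--         return go(lo, mid) + go(mid, hi)
--
--     return int(go(0, len(items)))
-- ===== Notes on version B (the rewrite author's own statement) =====
-- stated objective: alternative
-- what changed: B replaces A's linear keys-loop with an accumulator and a dict lookup per key by a balanced divide-and-conquer recursion over the items list that splits the index range in half and adds the two half-sums.
import Mathlib
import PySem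

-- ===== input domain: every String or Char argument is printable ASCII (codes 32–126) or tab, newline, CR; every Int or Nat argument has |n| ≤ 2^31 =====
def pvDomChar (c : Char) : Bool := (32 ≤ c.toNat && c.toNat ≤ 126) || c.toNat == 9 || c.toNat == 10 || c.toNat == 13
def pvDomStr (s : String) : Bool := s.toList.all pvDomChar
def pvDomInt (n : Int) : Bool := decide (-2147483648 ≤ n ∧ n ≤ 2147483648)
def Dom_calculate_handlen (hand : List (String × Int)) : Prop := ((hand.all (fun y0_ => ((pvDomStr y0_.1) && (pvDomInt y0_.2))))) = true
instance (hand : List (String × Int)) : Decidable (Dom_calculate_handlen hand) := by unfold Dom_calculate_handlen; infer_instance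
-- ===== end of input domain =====

-- B replaces A's accumulator loop over the keys (with a dict lookup per key) by a balanced
-- divide-and-conquer summation over the items list (objective: alternative).

-- ===== PORT A =====
-- for letter in hand.keys(): if letter != "*": length += hand[letter]
-- hand[letter] is ported as getD: the key comes from hand.keys(), so the lookup always succeeds in Python.
def calculate_handlen (hand : List (String × Int)) : Int :=
  (PySem.Dict.mk hand).keys.foldl
    (fun acc letter => if letter ≠ "*" then acc + (PySem.Dict.mk hand).getD letter 0 else acc) 0

-- ===== PORT B =====
-- go(lo, hi): divide-and-conquer sum of the non-wildcard counts in items[lo:hi].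
-- items[lo] is ported as pyGet? with default 0 on none: go is only called with 0 ≤ lo < len(items),
-- so the none branch is unreachable in Python.  The fuel parameter only makes the recursion
-- structural: hi - lo shrinks at every call, so fuel = len(items) at the top call never runs out.
def pvGoB (items : List (String × Int)) (fuel : Nat) (lo hi : Int) : Int :=
  match fuel with
  | 0 => 0
  | fuel + 1 =>
    if hi - lo ≤ 0 then 0
    else if hi - lo = 1 then
      match PySem.List.pyGet? items lo with
      | some (letter, count) => if letter = "*" then 0 else count
      | none => 0
    else
      pvGoB items fuel lo (PySem.Int.floordiv (lo + hi) 2)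
        + pvGoB items fuel (PySem.Int.floordiv (lo + hi) 2) hi

def calculate_handlen_alt (hand : List (String × Int)) : Int :=
  pvGoB (PySem.Dict.mk hand).items (PySem.Dict.mk hand).items.length 0 ((PySem.Dict.mk hand).items.length)

-- ===== PRECONDITION & SPEC =====
-- Pre_ excludes association lists with duplicate keys: a Python dict never contains duplicate keys,
-- so such lists do not represent any dict input of the Python programs.
def Pre_calculate_handlen (hand : List (String × Int)) : Prop := (hand.map Prod.fst).Nodup
instance (hand : List (String × Int)) : Decidable (Pre_calculate_handlen hand) := by unfold Pre_calculate_handlen; infer_instance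
def pvWitness_calculate_handlen : (List (String × Int)) := [("a", 1), ("*", 2), ("b", 3)]
def Spec_calculate_handlen (hand : List (String × Int)) (out : Int) : Prop := out = calculate_handlen_alt hand
instance (hand : List (String × Int)) (out : Int) : Decidable (Spec_calculate_handlen hand out) := by unfold Spec_calculate_handlen; infer_instance

-- ===== CLAIM (what is proved, stated in full; the proofs are below) =====
def Claim_equal_calculate_handlen : Prop := ∀ (hand : List (String × Int)), Dom_calculate_handlen hand → Pre_calculate_handlen hand → Spec_calculate_handlen hand (calculate_handlen hand)

-- ===== LEMMAS AND PROOFS =====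

-- sum of the non-wildcard values, the common reference value
def pvS (hand : List (String × Int)) : Int :=
  ((hand.filter (fun p => p.1 ≠ "*")).map Prod.snd).sum

theorem pvS_append (a b : List (String × Int)) : pvS (a ++ b) = pvS a + pvS b := by
  simp [pvS]

-- B's divide-and-conquer computes pvS of the corresponding segment
theorem pvGoB_eq (items : List (String × Int)) (fuel : Nat) (lo hi : Int)
    (hlo : 0 ≤ lo) (hfuel : (hi - lo).toNat ≤ fuel) :
    pvGoB items fuel lo hi = pvS ((items.drop lo.toNat).take (hi - lo).toNat) := by
  induction fuel generalizing lo hi with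
  | zero =>
      have : (hi - lo).toNat = 0 := by omega
      simp [pvGoB, this, pvS]
  | succ fuel ih =>
      unfold pvGoB
      by_cases h0 : hi - lo ≤ 0
      · simp only [if_pos h0]
        have : (hi - lo).toNat = 0 := by omega
        simp [this, pvS]
      · rw [if_neg h0]
        by_cases h1 : hi - lo = 1
        · rw [if_pos h1]
          rw [PySem.List.pyGet?_of_nonneg items hlo]
          have ht1 : (hi - lo).toNat = 1 := by omega
          rw [ht1]
          rcases hE : items[lo.toNat]? with _ | p
          · have hge : items.length ≤ lo.toNat := by
              simpa using List.getElem?_eq_none_iff.mp hE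
            rw [List.drop_eq_nil_of_le hge]
            simp [pvS]
          · obtain ⟨hlt, hval⟩ := List.getElem?_eq_some_iff.mp hE
            have hseg : (items.drop lo.toNat).take 1 = [p] := by
              rw [← List.getElem_cons_drop hlt]
              simp [hval]
            rw [hseg]
            rcases p with ⟨letter, count⟩
            by_cases hst : letter = "*" <;> simp [pvS, hst]
        · rw [if_neg h1]
          have h2 : 2 ≤ hi - lo := by omega
          set mid := PySem.Int.floordiv (lo + hi) 2 with hmid
          have hmide : mid = (lo + hi) / 2 := by
            rw [hmid, PySem.Int.floordiv_eq_ediv_of_pos (by omega : (0:Int) < 2)]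
          have hb1 : lo < mid := by omega
          have hb2 : mid < hi := by omega
          rw [ih lo mid hlo (by omega), ih mid hi (by omega) (by omega)]
          have hsplit : (items.drop lo.toNat).take (hi - lo).toNat
              = (items.drop lo.toNat).take (mid - lo).toNat
                ++ (items.drop mid.toNat).take (hi - mid).toNat := by
            have hadd : (hi - lo).toNat = (mid - lo).toNat + (hi - mid).toNat := by omega
            have hdd : (items.drop lo.toNat).drop (mid - lo).toNat = items.drop mid.toNat := by
              rw [List.drop_drop]
              congr 1
              omega
            rw [hadd, List.take_add, hdd]
          rw [hsplit, pvS_append]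

-- A's loop adds pvS to the accumulator
theorem pv_loopA (hand : List (String × Int)) (hnd : (hand.map Prod.fst).Nodup) (acc : Int) :
    (hand.map Prod.fst).foldl
      (fun acc letter => if letter ≠ "*" then acc + (PySem.Dict.mk hand).getD letter 0 else acc) acc
      = acc + pvS hand := by
  induction hand generalizing acc with
  | nil => simp [pvS]
  | cons p rest ih =>
      obtain ⟨k, v⟩ := p
      simp only [List.map_cons, List.nodup_cons] at hnd
      have hself : (PySem.Dict.mk ((k, v) :: rest)).getD k 0 = v := by
        rw [PySem.Dict.getD_eq_get?_getD, PySem.Dict.get?_mk_cons]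
        simp
      have hcongr :
          (rest.map Prod.fst).foldl
            (fun acc letter => if letter ≠ "*" then acc + (PySem.Dict.mk ((k, v) :: rest)).getD letter 0 else acc)
            (if k ≠ "*" then acc + (PySem.Dict.mk ((k, v) :: rest)).getD k 0 else acc)
          = (rest.map Prod.fst).foldl
            (fun acc letter => if letter ≠ "*" then acc + (PySem.Dict.mk rest).getD letter 0 else acc)
            (if k ≠ "*" then acc + (PySem.Dict.mk ((k, v) :: rest)).getD k 0 else acc) := by
        apply PySem.List.foldl_congr_mem
        intro a x hx
        have hkx : (k == x) = false := by
          simp only [beq_eq_false_iff_ne]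
          exact fun hk => hnd.1 (hk ▸ hx)
        have : (PySem.Dict.mk ((k, v) :: rest)).getD x 0 = (PySem.Dict.mk rest).getD x 0 := by
          rw [PySem.Dict.getD_eq_get?_getD, PySem.Dict.get?_mk_cons, hkx]
          simp [← PySem.Dict.getD_eq_get?_getD]
        rw [this]
      simp only [List.map_cons, List.foldl_cons]
      rw [hcongr, ih hnd.2]
      by_cases hk : k = "*"
      · subst hk; simp [pvS]
      · simp only [if_pos (by exact hk : k ≠ "*"), hself]
        have : pvS ((k, v) :: rest) = v + pvS rest := by
          simp [pvS, hk]
        rw [this]; ring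

-- ===== VERDICT (by name: the statement is the Claim_ definition above) =====
theorem calculate_handlen_spec : Claim_equal_calculate_handlen := by
  intro hand _ hpre
  unfold Spec_calculate_handlen calculate_handlen calculate_handlen_alt
  have hitems : (PySem.Dict.mk hand).items = hand := rfl
  have hkeys : (PySem.Dict.mk hand).keys = hand.map Prod.fst := rfl
  rw [hitems, hkeys, pv_loopA hand hpre 0,
      pvGoB_eq hand hand.length 0 hand.length (le_refl 0) (by omega)]
  simp
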